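-- pv_equiv track=rewrite | github.com/miseop25/Back_Jun_Code_Study | Programmers/기타문제/숫자게임/num_game_ver3.py | solution
-- ===== SOURCE A (Python) =====
-- from collections import deque
--
-- def solution(A, B):
--     answer = 0
--     result = []
--     b = deque(B)
--     a = deque(A)
--     while a :
--         comp = a.popleft()
--         b = deque(sorted(b, key=lambda x: x if comp < x else (-x + 1000000000) ))
--         if b[0] > comp :
--             answer += 1
--             result.append(b.popleft())
--         else :
--             result.append(b.pop())
--
--
--     return answer
-- ===== SOURCE B (Python) =====
-- def solution(A, B):
--     s = list(B)
--     answer = 0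
--     for comp in A:
--         key = lambda x: x if comp < x else 1000000000 - x
--         lo = min(range(len(s)), key=lambda i: key(s[i]))
--         if s[lo] > comp:
--             answer += 1
--             s.pop(lo)
--         else:
--             hi = max(range(len(s)), key=lambda i: key(s[i]))
--             s.pop(hi)
--     return answer
-- ===== Notes on version B (the rewrite author's own statement) =====
-- stated objective: alternative
-- what changed: B never sorts: instead of re-sorting the whole remaining deque by the ranking key each round and taking its two ends, B selects the minimal-key (and, on a loss, maximal-key) element with a direct one-pass argmin/argmax and removes it by index; Pre_ excludes len(A)>len(B), where A raises IndexError, and cross-group key ties (y<=c<x with x+y=10**9), where the removed element depends on the accidental stable-sort position of the two tied elements.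
-- outside the precondition, e.g. on solution([1, 1], [1, 999999999, 1]): A returns 0, B returns 1
import Mathlib
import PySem

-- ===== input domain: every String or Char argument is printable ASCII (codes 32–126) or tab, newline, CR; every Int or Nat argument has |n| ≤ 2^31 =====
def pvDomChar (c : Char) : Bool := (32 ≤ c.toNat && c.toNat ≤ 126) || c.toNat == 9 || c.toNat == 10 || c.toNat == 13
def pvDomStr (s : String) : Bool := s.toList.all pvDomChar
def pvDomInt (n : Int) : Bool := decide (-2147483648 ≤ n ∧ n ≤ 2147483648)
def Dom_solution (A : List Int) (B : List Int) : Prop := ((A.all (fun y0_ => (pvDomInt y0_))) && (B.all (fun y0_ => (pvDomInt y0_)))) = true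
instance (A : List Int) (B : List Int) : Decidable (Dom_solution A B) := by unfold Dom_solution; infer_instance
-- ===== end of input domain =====

-- B selects the minimal-key (and, on a loss, maximal-key) element by a one-pass argmin/argmax
-- instead of re-sorting the whole remaining pool by the key each round (objective: alternative;
-- A's 'result' list is write-only).

-- ===== PORT A =====
-- the while-loop over deque a, carrying (b, result, answer); b[0] on an empty b raises IndexError
-- in Python, there the port returns the running answer (such inputs are excluded by Pre_)
def solutionGo : List Int → List Int → List Int → Int → Int
  | [], _, _, answer => answer
  | comp :: arest, b, result, answer =>
    match PySem.List.sorted b (fun x => if comp < x then x else -x + 1000000000) false with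
    | [] => answer
    | h :: t =>
      if h > comp then solutionGo arest t (result ++ [h]) (answer + 1)
      else solutionGo arest ((h :: t).dropLast) (result ++ [(h :: t).getLast (List.cons_ne_nil h t)]) answer

def solution (A : List Int) (B : List Int) : Int := solutionGo A B [] 0

-- ===== PORT B =====
-- the lambda 'key'
def keyOf (comp x : Int) : Int := if comp < x then x else 1000000000 - x

-- 'min(range(n), key=f)': first index with minimal f-value (Python min keeps the earliest minimum)
def argminIdx (f : Nat → Int) (n : Nat) : Nat :=
  (List.range n).foldl (fun b i => if f i < f b then i else b) 0

-- 'max(range(n), key=f)': first index with maximal f-value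
def argmaxIdx (f : Nat → Int) (n : Nat) : Nat :=
  (List.range n).foldl (fun b i => if f i > f b then i else b) 0

-- the for-loop over A carrying (s, answer); min() on an empty s raises ValueError in Python,
-- there the port proceeds with the empty list (such inputs are excluded by Pre_)
def altGo : List Int → List Int → Int → Int
  | [], _, answer => answer
  | comp :: arest, s, answer =>
    let lo := argminIdx (fun i => keyOf comp (s.getD i 0)) s.length
    if s.getD lo 0 > comp then
      altGo arest (s.eraseIdx lo) (answer + 1)
    else
      let hi := argmaxIdx (fun i => keyOf comp (s.getD i 0)) s.length
      altGo arest (s.eraseIdx hi) answer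

def solution_alt (A : List Int) (B : List Int) : Int := altGo A B 0

-- ===== PRECONDITION & SPEC =====
-- Pre_ excludes (a) inputs with len(A) > len(B), on which A raises IndexError, and (b) inputs
-- containing a cross-group key tie x + y = 10^9 with y ≤ comp < x, on which A's answer depends
-- on the accidental stable-sort position of the two tied elements.
def Pre_solution (A : List Int) (B : List Int) : Prop :=
  A.length ≤ B.length ∧
    ∀ c ∈ A, ∀ x ∈ B, ∀ y ∈ B, y ≤ c → c < x → x + y ≠ 1000000000
instance (A : List Int) (B : List Int) : Decidable (Pre_solution A B) := by
  unfold Pre_solution; infer_instance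

def pvWitness_solution : List Int × List Int := ([1, 5], [2, 0, 7])

def Spec_solution (A : List Int) (B : List Int) (out : Int) : Prop := out = solution_alt A B
instance (A : List Int) (B : List Int) (out : Int) : Decidable (Spec_solution A B out) := by
  unfold Spec_solution; infer_instance

-- ===== CLAIM (what is proved, stated in full; the proofs are below) =====
def Claim_equal_solution : Prop := ∀ (A : List Int) (B : List Int), Dom_solution A B → Pre_solution A B → Spec_solution A B (solution A B)

-- ===== LEMMAS AND PROOFS =====

lemma solutionGo_cons_eq (comp : Int) (arest b res : List Int) (ans : Int) (hd : Int) (tl : List Int)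
    (hb : PySem.List.sorted b (fun x => if comp < x then x else -x + 1000000000) false = hd :: tl) :
    solutionGo (comp :: arest) b res ans =
      if hd > comp then solutionGo arest tl (res ++ [hd]) (ans + 1)
      else solutionGo arest ((hd :: tl).dropLast) (res ++ [(hd :: tl).getLast (List.cons_ne_nil hd tl)]) ans := by
  simp only [solutionGo]
  rw [hb]

lemma altGo_cons_eq (comp : Int) (arest s : List Int) (ans : Int) :
    altGo (comp :: arest) s ans =
      (if s.getD (argminIdx (fun i => keyOf comp (s.getD i 0)) s.length) 0 > comp then
        altGo arest (s.eraseIdx (argminIdx (fun i => keyOf comp (s.getD i 0)) s.length)) (ans + 1)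
      else
        altGo arest (s.eraseIdx (argmaxIdx (fun i => keyOf comp (s.getD i 0)) s.length)) ans) := rfl

lemma argmin_succ (f : Nat → Int) (n : Nat) :
    argminIdx f (n + 1) = if f n < f (argminIdx f n) then n else argminIdx f n := by
  simp [argminIdx, List.range_succ]

lemma argmax_succ (f : Nat → Int) (n : Nat) :
    argmaxIdx f (n + 1) = if f n > f (argmaxIdx f n) then n else argmaxIdx f n := by
  simp [argmaxIdx, List.range_succ]

lemma argmin_spec (f : Nat → Int) : ∀ n, 0 < n →
    argminIdx f n < n ∧ ∀ i, i < n → f (argminIdx f n) ≤ f i := by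
  intro n
  induction n with
  | zero => omega
  | succ m ih =>
    intro _
    rw [argmin_succ]
    by_cases hm : 0 < m
    · obtain ⟨h1, h2⟩ := ih hm
      split_ifs with hlt
      · refine ⟨by omega, ?_⟩
        intro i hi
        rcases Nat.lt_succ_iff_lt_or_eq.mp hi with h | h
        · exact le_of_lt (lt_of_lt_of_le hlt (h2 i h))
        · subst h; exact le_refl _
      · refine ⟨by omega, ?_⟩
        intro i hi
        rcases Nat.lt_succ_iff_lt_or_eq.mp hi with h | h
        · exact h2 i h
        · subst h; exact not_lt.mp hlt
    · have hm0 : m = 0 := by omega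
      subst hm0
      have : argminIdx f 0 = 0 := rfl
      rw [this]
      simp only [lt_self_iff_false, if_false]
      exact ⟨by omega, by intro i hi; interval_cases i; exact le_refl _⟩

lemma argmax_spec (f : Nat → Int) : ∀ n, 0 < n →
    argmaxIdx f n < n ∧ ∀ i, i < n → f i ≤ f (argmaxIdx f n) := by
  intro n
  induction n with
  | zero => omega
  | succ m ih =>
    intro _
    rw [argmax_succ]
    by_cases hm : 0 < m
    · obtain ⟨h1, h2⟩ := ih hm
      split_ifs with hlt
      · refine ⟨by omega, ?_⟩
        intro i hi
        rcases Nat.lt_succ_iff_lt_or_eq.mp hi with h | h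
        · exact le_of_lt (lt_of_le_of_lt (h2 i h) hlt)
        · subst h; exact le_refl _
      · refine ⟨by omega, ?_⟩
        intro i hi
        rcases Nat.lt_succ_iff_lt_or_eq.mp hi with h | h
        · exact h2 i h
        · subst h; exact not_lt.mp hlt
    · have hm0 : m = 0 := by omega
      subst hm0
      have : argmaxIdx f 0 = 0 := rfl
      rw [this]
      simp only [gt_iff_lt, lt_self_iff_false, if_false]
      exact ⟨by omega, by intro i hi; interval_cases i; exact le_refl _⟩

-- within the no-tie region the key is injective on the values of s
lemma key_inj (comp x y : Int)
    (hxy : y ≤ comp → comp < x → x + y ≠ 1000000000)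
    (hyx : x ≤ comp → comp < y → y + x ≠ 1000000000)
    (hk : keyOf comp x = keyOf comp y) : x = y := by
  unfold keyOf at hk
  by_cases hx : comp < x <;> by_cases hy : comp < y <;> simp [hx, hy] at hk
  · omega
  · have := hxy (not_lt.mp hy) hx; omega
  · have := hyx (not_lt.mp hx) hy; omega
  · omega

-- on a (fun a b => f a ≤ f b)-pairwise list the last element has the maximal f-value
lemma getLast_max {f : Int → Int} : ∀ (l : List Int) (hne : l ≠ []),
    l.Pairwise (fun a b => f a ≤ f b) → ∀ x ∈ l, f x ≤ f (l.getLast hne) := by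
  intro l
  induction l with
  | nil => intro hne; exact absurd rfl hne
  | cons a u ih =>
    intro hne hp x hx
    rcases List.pairwise_cons.mp hp with ⟨ha, hp'⟩
    cases u with
    | nil => simp at hx; subst hx; simp
    | cons b v =>
      rw [List.getLast_cons (List.cons_ne_nil b v)]
      rcases List.mem_cons.mp hx with rfl | hx'
      · exact ha _ (List.getLast_mem (List.cons_ne_nil b v))
      · exact ih (List.cons_ne_nil b v) hp' x hx'

-- dropping the last element is, as a multiset, erasing the last element's value
lemma dropLast_perm_erase : ∀ (l : List Int) (hne : l ≠ []),
    l.dropLast.Perm (l.erase (l.getLast hne)) := by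
  intro l hne
  have h1 : l.dropLast ++ [l.getLast hne] = l := List.dropLast_append_getLast hne
  have h2 : l.Perm (l.getLast hne :: l.dropLast) := by
    conv_lhs => rw [← h1]
    exact List.perm_append_singleton _ _
  have h3 := h2.erase (l.getLast hne)
  rw [List.erase_cons_head] at h3
  exact h3.symm

-- removing by index is, as a multiset, erasing the value at that index
lemma eraseIdx_perm_erase (s : List Int) (i : Nat) (hi : i < s.length) :
    (s.eraseIdx i).Perm (s.erase s[i]) := by
  have hmem : s[i] ∈ s := List.getElem_mem hi
  have h1 : s.Perm (s[i] :: s.erase s[i]) := List.perm_cons_erase hmem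
  have h2 : s = s.take i ++ s[i] :: s.drop (i + 1) := by
    conv_lhs => rw [← List.take_append_drop i s]
    rw [List.drop_eq_getElem_cons hi]
  have h3 : s.Perm (s[i] :: s.eraseIdx i) := by
    rw [List.eraseIdx_eq_take_drop_succ]
    conv_lhs => rw [h2]
    exact List.perm_middle
  exact (h3.symm.trans h1).cons_inv

-- the central loop invariant: A's state b is a permutation of B's state s, and under the
-- no-tie precondition both loops remove the same value and score the same point each round
lemma go_eq : ∀ (a bA s res : List Int) (ans : Int),
    bA.Perm s → a.length ≤ s.length →
    (∀ c ∈ a, ∀ x ∈ s, ∀ y ∈ s, y ≤ c → c < x → x + y ≠ 1000000000) →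
    solutionGo a bA res ans = altGo a s ans := by
  intro a
  induction a with
  | nil => intro bA s res ans _ _ _; rfl
  | cons comp arest ih =>
    intro bA s res ans hperm hlen hnt
    have hlen' : arest.length + 1 ≤ s.length := by simpa using hlen
    have hsn : 0 < s.length := by omega
    have hsne : s ≠ [] := List.ne_nil_of_length_pos hsn
    have hbn : bA ≠ [] := by
      intro h; subst h
      have := hperm.length_eq; simp at this; omega
    have hb'ne : PySem.List.sorted bA (fun x => if comp < x then x else -x + 1000000000) false ≠ [] :=
      fun h => hbn ((PySem.List.sorted_eq_nil_iff _ _ _).mp h)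
    obtain ⟨hd, tl, hb'⟩ : ∃ hd tl,
        PySem.List.sorted bA (fun x => if comp < x then x else -x + 1000000000) false = hd :: tl := by
      cases hcase : PySem.List.sorted bA (fun x => if comp < x then x else -x + 1000000000) false with
      | nil => exact absurd hcase hb'ne
      | cons x y => exact ⟨x, y, rfl⟩
    rw [solutionGo_cons_eq comp arest bA res ans hd tl hb', altGo_cons_eq]
    have hkeyeq : ∀ x : Int, (if comp < x then x else -x + 1000000000) = keyOf comp x := by
      intro x; unfold keyOf; split_ifs <;> omega
    have hpermht : (hd :: tl).Perm bA := by rw [← hb']; exact PySem.List.sorted_perm ..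
    have hmemS : ∀ x : Int, x ∈ s ↔ x ∈ bA := fun x => hperm.mem_iff.symm
    have hhd_s : hd ∈ s := (hperm.mem_iff).mp (hpermht.subset (by simp))
    -- head of the key-sorted list has the minimal key, its last element the maximal key
    have hmin : ∀ y ∈ s, keyOf comp hd ≤ keyOf comp y := by
      intro y hy
      have := PySem.List.key_head_sorted_le _ _ hb' y ((hmemS y).mp hy)
      simpa [hkeyeq] using this
    have hpwK : (hd :: tl).Pairwise (fun a b => keyOf comp a ≤ keyOf comp b) := by
      have := PySem.List.sorted_pairwise bA (fun x => if comp < x then x else -x + 1000000000)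
      rw [hb'] at this
      simpa [hkeyeq] using this
    have hgmax : ∀ y ∈ s, keyOf comp y ≤ keyOf comp ((hd :: tl).getLast (List.cons_ne_nil hd tl)) := by
      intro y hy
      exact getLast_max (hd :: tl) (List.cons_ne_nil hd tl) hpwK y
        (hpermht.mem_iff.mpr ((hmemS y).mp hy))
    have hg_s : (hd :: tl).getLast (List.cons_ne_nil hd tl) ∈ s :=
      (hperm.mem_iff).mp (hpermht.subset (List.getLast_mem _))
    -- injectivity of the key on s's values
    have hinj : ∀ x ∈ s, ∀ y ∈ s, keyOf comp x = keyOf comp y → x = y := by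
      intro x hx y hy hk
      exact key_inj comp x y
        (hnt comp (List.mem_cons_self ..) x hx y hy)
        (hnt comp (List.mem_cons_self ..) y hy x hx) hk
    -- B-side: the chosen indices are in range and extremal
    obtain ⟨hlo_lt, hlo_min⟩ := argmin_spec (fun i => keyOf comp (s.getD i 0)) s.length hsn
    obtain ⟨hhi_lt, hhi_max⟩ := argmax_spec (fun i => keyOf comp (s.getD i 0)) s.length hsn
    set lo := argminIdx (fun i => keyOf comp (s.getD i 0)) s.length with hlodef
    set hi := argmaxIdx (fun i => keyOf comp (s.getD i 0)) s.length with hhidef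
    have hsloD : s.getD lo 0 = s[lo] := List.getD_eq_getElem s 0 hlo_lt
    have hshiD : s.getD hi 0 = s[hi] := List.getD_eq_getElem s 0 hhi_lt
    have hslo_mem : s[lo] ∈ s := List.getElem_mem hlo_lt
    have hshi_mem : s[hi] ∈ s := List.getElem_mem hhi_lt
    have hlo_minv : ∀ y ∈ s, keyOf comp s[lo] ≤ keyOf comp y := by
      intro y hy
      obtain ⟨j, hj, rfl⟩ := List.mem_iff_getElem.mp hy
      have h := hlo_min j hj
      simpa only [hsloD, List.getD_eq_getElem s 0 hj] using h
    have hhi_maxv : ∀ y ∈ s, keyOf comp y ≤ keyOf comp s[hi] := by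
      intro y hy
      obtain ⟨j, hj, rfl⟩ := List.mem_iff_getElem.mp hy
      have h := hhi_max j hj
      simpa only [hshiD, List.getD_eq_getElem s 0 hj] using h
    -- A's head is B's argmin value; A's last is B's argmax value
    have hdeq : hd = s[lo] := by
      apply hinj hd hhd_s s[lo] hslo_mem
      exact le_antisymm (hmin _ hslo_mem) (hlo_minv _ hhd_s)
    have hgeq : (hd :: tl).getLast (List.cons_ne_nil hd tl) = s[hi] := by
      apply hinj _ hg_s s[hi] hshi_mem
      exact le_antisymm (hhi_maxv _ hg_s) (hgmax _ hshi_mem)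
    -- uniform continuation via the induction hypothesis
    have cont : ∀ v ∈ s, ∀ (bA' s' : List Int), bA'.Perm (s.erase v) → s'.Perm (s.erase v) →
        ∀ (res' : List Int) (ans' : Int),
        solutionGo arest bA' res' ans' = altGo arest s' ans' := by
      intro v hv bA' s' h1 h2 res' ans'
      apply ih bA' s' res' ans' (h1.trans h2.symm)
      · have : s'.length = s.length - 1 := by
          rw [h2.length_eq, List.length_erase_of_mem hv]
        omega
      · intro c hc x hx y hy
        exact hnt c (List.mem_cons_of_mem comp hc)
          x (List.erase_subset (h2.subset hx)) y (List.erase_subset (h2.subset hy))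
    have hAhead : tl.Perm (s.erase hd) := by
      have h0 := hpermht.erase hd
      rw [List.erase_cons_head] at h0
      exact h0.trans (hperm.erase hd)
    have hAlast : ((hd :: tl).dropLast).Perm
        (s.erase ((hd :: tl).getLast (List.cons_ne_nil hd tl))) :=
      (dropLast_perm_erase _ _).trans ((hpermht.erase _).trans (hperm.erase _))
    rw [hsloD, ← hdeq]
    by_cases hw : hd > comp
    · rw [if_pos hw, if_pos hw]
      apply cont hd hhd_s tl (s.eraseIdx lo) hAhead
      · have := eraseIdx_perm_erase s lo hlo_lt
        rwa [← hdeq] at this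
    · rw [if_neg hw, if_neg hw]
      apply cont ((hd :: tl).getLast (List.cons_ne_nil hd tl)) hg_s _ (s.eraseIdx hi) hAlast
      · have := eraseIdx_perm_erase s hi hhi_lt
        rwa [← hgeq] at this

-- ===== VERDICT (by name: the statement is the Claim_ definition above) =====
theorem solution_spec : Claim_equal_solution := by
  intro A B _ hpre
  unfold Spec_solution solution solution_alt
  exact go_eq A B B [] 0 (List.Perm.refl B) hpre.1 hpre.2
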